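-- pv_equiv track=rewrite | github.com/FireSpirit171/TMO | tinkoff/main.py | calculate_min_cuts
-- ===== SOURCE A (Python) =====
-- def calculate_min_cuts(n, s, a):
--     prefix = [0] * (n + 1)
--     for i in range(n):
--         prefix[i+1] = prefix[i] + a[i]
--
--     total = 0
--     for l in range(1, n+1):
--         for r in range(l, n+1):
--             segment_sum = prefix[r] - prefix[l-1]
--             cuts = (segment_sum + s - 1) // s
--             total += cuts
--     return total
-- ===== SOURCE B (Python) =====
-- def calculate_min_cuts(n, s, a):
--     # One pass over right endpoints: each ceiling ceil(d/s) = (d-1)//s + 1 is split by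
--     # the floor-division identity into per-endpoint quotients plus a residue-comparison
--     # correction, so the inner work per pair is a single comparison of precomputed residues.
--     P = [0]
--     for x in a[:n]:
--         P.append(P[-1] + x)
--     left = []
--     total = 0
--     bad = 0
--     for r in range(1, n + 1):
--         left.append(P[r - 1] % s)
--         qr = (P[r] - 1) % s
--         total += r * ((P[r] - 1) // s + 1) - (n - r + 1) * (P[r - 1] // s)
--         bad += sum(1 for q in left if qr < q)
--     return total - bad
-- ===== Notes on version B (the rewrite author's own statement) =====
-- stated objective: alternative
-- what changed: Instead of a ceiling division (segment_sum+s-1)//s for every (l,r) pair, B splits each ceiling via the floor-division identity into per-endpoint quotients aggregated in closed form during one pass over right endpoints, leaving only a comparison of precomputed prefix residues per pair; Pre_ excludes the inputs where A raises (n > len(a): IndexError; s = 0 with n >= 1: ZeroDivisionError) and non-positive s with n >= 1, outside the natural domain of positive segment sizes, where the (d+s-1)//s idiom is no ceiling and either value is defensible.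
-- outside the precondition, e.g. on calculate_min_cuts(1, -5, [-7]): A returns 2, B returns 1
import Mathlib
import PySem

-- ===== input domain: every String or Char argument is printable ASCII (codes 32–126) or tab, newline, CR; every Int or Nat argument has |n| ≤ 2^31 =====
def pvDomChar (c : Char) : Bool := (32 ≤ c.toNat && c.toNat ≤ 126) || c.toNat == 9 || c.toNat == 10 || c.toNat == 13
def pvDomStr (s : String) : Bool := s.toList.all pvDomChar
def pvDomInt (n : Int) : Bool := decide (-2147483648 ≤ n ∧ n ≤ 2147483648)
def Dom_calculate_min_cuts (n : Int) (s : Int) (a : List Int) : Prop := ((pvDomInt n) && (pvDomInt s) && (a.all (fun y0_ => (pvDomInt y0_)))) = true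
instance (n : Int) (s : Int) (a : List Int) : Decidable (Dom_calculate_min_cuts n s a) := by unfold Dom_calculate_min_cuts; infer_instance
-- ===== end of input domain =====

-- B replaces A's per-pair ceiling division by per-endpoint quotients aggregated in one
-- pass plus a residue comparison per pair (alternative algorithm, same asymptotic cost).

-- ===== PORT A =====
def calculate_min_cuts (n : Int) (s : Int) (a : List Int) : Int :=
  -- prefix = [0] * (n + 1); for i in range(n): prefix[i+1] = prefix[i] + a[i]
  let prefix0 : List Int := List.replicate (n + 1).toNat 0
  let prefixL := (PySem.List.pyRange 0 n 1).foldl (fun pre i =>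
      PySem.List.pySetD pre (i + 1) (PySem.List.pyGetD pre i 0 + PySem.List.pyGetD a i 0)) prefix0
  -- total = 0; for l in range(1, n+1): for r in range(l, n+1): total += (prefix[r]-prefix[l-1]+s-1)//s
  (PySem.List.pyRange 1 (n + 1) 1).foldl (fun total l =>
    (PySem.List.pyRange l (n + 1) 1).foldl (fun total r =>
      let segment_sum := PySem.List.pyGetD prefixL r 0 - PySem.List.pyGetD prefixL (l - 1) 0
      let cuts := PySem.Int.floordiv (segment_sum + s - 1) s
      total + cuts) total) 0

-- ===== PORT B =====
def calculate_min_cuts_alt (n : Int) (s : Int) (a : List Int) : Int :=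
  -- P = [0]; for x in a[:n]: P.append(P[-1] + x)   (running prefix via the pair state)
  let st0 := (PySem.List.slice a none (some n)).foldl
      (fun (st : Int × List Int) x => (st.1 + x, st.2 ++ [st.1 + x])) (0, [0])
  let P := st0.2
  -- left = []; total = 0; bad = 0; for r in range(1, n+1): …
  let res := (PySem.List.pyRange 1 (n + 1) 1).foldl (fun (st : List Int × Int × Int) r =>
      let left := st.1 ++ [PySem.Int.mod (PySem.List.pyGetD P (r - 1) 0) s]
      let qr := PySem.Int.mod (PySem.List.pyGetD P r 0 - 1) s
      let total := st.2.1 + (r * (PySem.Int.floordiv (PySem.List.pyGetD P r 0 - 1) s + 1)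
          - (n - r + 1) * PySem.Int.floordiv (PySem.List.pyGetD P (r - 1) 0) s)
      let bad := st.2.2 + left.foldl (fun c q => if qr < q then c + 1 else c) 0
      (left, total, bad)) ([], 0, 0)
  res.2.1 - res.2.2

-- ===== PRECONDITION & SPEC =====
-- Pre_ excludes the inputs where A raises (n > len(a): IndexError at a[i]; s = 0 with
-- n ≥ 1: ZeroDivisionError) and non-positive s with n ≥ 1, outside the task's natural
-- domain of positive segment sizes, where the (d+s-1)//s idiom is no ceiling and
-- either value is defensible.
def Pre_calculate_min_cuts (n : Int) (s : Int) (a : List Int) : Prop :=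
  n ≤ (a.length : Int) ∧ (0 < n → 0 < s)
instance (n : Int) (s : Int) (a : List Int) : Decidable (Pre_calculate_min_cuts n s a) := by
  unfold Pre_calculate_min_cuts; infer_instance
def pvWitness_calculate_min_cuts : Int × Int × List Int := (3, 2, [1, -4, 7])
def Spec_calculate_min_cuts (n : Int) (s : Int) (a : List Int) (out : Int) : Prop := out = calculate_min_cuts_alt n s a
instance (n : Int) (s : Int) (a : List Int) (out : Int) : Decidable (Spec_calculate_min_cuts n s a out) := by unfold Spec_calculate_min_cuts; infer_instance

-- ===== CLAIM (what is proved, stated in full; the proofs are below) =====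
def Claim_equal_calculate_min_cuts : Prop := ∀ (n : Int) (s : Int) (a : List Int), Dom_calculate_min_cuts n s a → Pre_calculate_min_cuts n s a → Spec_calculate_min_cuts n s a (calculate_min_cuts n s a)

-- ===== LEMMAS AND PROOFS =====

-- prefix sums, the shared mathematical backbone
def pfx (a : List Int) (k : Nat) : Int := (a.take k).sum

def KrV (s x : Int) : Int := PySem.Int.floordiv (x - 1) s
def KlV (s y : Int) : Int := PySem.Int.floordiv y s
def badV (s x y : Int) : Int := if PySem.Int.mod (x - 1) s < PySem.Int.mod y s then 1 else 0

theorem fd_shift (s K d : Int) (hs : 0 < s) (h1 : -s ≤ d) (h2 : d < s) :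
    PySem.Int.floordiv (K * s + d) s = K + (if d < 0 then -1 else 0) := by
  rw [PySem.Int.floordiv_eq_iff_of_pos hs]
  split_ifs with h <;> constructor <;> nlinarith

-- the per-pair decomposition of Python's (x - y + s - 1) // s for positive s
theorem pair_id (s x y : Int) (hs : 0 < s) :
    PySem.Int.floordiv (x - y + s - 1) s = KrV s x + 1 - KlV s y - badV s x y := by
  unfold KrV KlV badV
  set qx := PySem.Int.mod (x - 1) s with hqx
  set qy := PySem.Int.mod y s with hqy
  have ex : PySem.Int.floordiv (x - 1) s * s + qx = x - 1 := PySem.Int.floordiv_mul_add_mod (x - 1) s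
  have ey : PySem.Int.floordiv y s * s + qy = y := PySem.Int.floordiv_mul_add_mod y s
  set kx := PySem.Int.floordiv (x - 1) s
  set ky := PySem.Int.floordiv y s
  have bx1 := PySem.Int.mod_nonneg (x - 1) hs
  have bx2 := PySem.Int.mod_lt (x - 1) hs
  have by1 := PySem.Int.mod_nonneg y hs
  have by2 := PySem.Int.mod_lt y hs
  rw [← hqx] at bx1 bx2; rw [← hqy] at by1 by2
  have e3 : x - y + s - 1 = (kx - ky + 1) * s + (qx - qy) := by
    have hr : (kx - ky + 1) * s = kx * s - ky * s + s := by ring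
    omega
  rw [e3, fd_shift s _ _ hs (by omega) (by omega)]
  split_ifs <;> omega

theorem pfx_zero (a : List Int) : pfx a 0 = 0 := rfl

theorem pfx_succ (a : List Int) (j : Nat) : pfx a (j + 1) = pfx a j + a.getD j 0 := by
  unfold pfx
  by_cases h : j < a.length
  · rw [List.getD_eq_getElem a 0 h, List.sum_take_succ a j h]
  · have h1 : a.take (j + 1) = a := List.take_of_length_le (by omega)
    have h2 : a.take j = a := List.take_of_length_le (by omega)
    rw [h1, h2, List.getD_eq_default a 0 (by omega), add_zero]

theorem PL_getD (a : List Int) (m t : Nat) (ht : t < m + 1) :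
    (((List.range (m + 1)).map (pfx a)).getD t 0) = pfx a t := by
  rw [List.getD_eq_getElem _ 0 (by simp [ht])]
  simp

-- list-sum of a map over List.range as a Finset sum
theorem sum_map_listrange (N : Nat) (g : Nat → Int) :
    ((List.range N).map g).sum = ∑ k ∈ Finset.range N, g k := by
  induction N with
  | zero => simp
  | succ n ih => rw [List.range_succ, List.map_append, List.sum_append,
      Finset.sum_range_succ, ih]; simp

theorem sum_map_pyRange (a0 : Int) (N : Nat) (f : Int → Int) :
    ((PySem.List.pyRange a0 (a0 + (N : Int)) 1).map f).sum = ∑ k ∈ Finset.range N, f (a0 + (k : Int)) := by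
  rw [PySem.List.pyRange_one]
  have : (a0 + (N : Int) - a0).toNat = N := by omega
  rw [this, List.map_map, sum_map_listrange]
  rfl

-- triangle reindexing: pairs (l, r) with l ≤ r < m, enumerated by l first vs by r first
theorem tri_sum (m : Nat) (g : Nat → Nat → Int) :
    ∑ j ∈ Finset.range m, ∑ k ∈ Finset.range (m - j), g j (j + k)
      = ∑ r ∈ Finset.range m, ∑ l ∈ Finset.range (r + 1), g l r := by
  induction m with
  | zero => simp
  | succ n ih =>
      rw [Finset.sum_range_succ (f := fun r => ∑ l ∈ Finset.range (r + 1), g l r), ← ih]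
      have step : ∀ j ∈ Finset.range (n + 1),
          ∑ k ∈ Finset.range (n + 1 - j), g j (j + k)
            = (∑ k ∈ Finset.range (n - j), g j (j + k)) + g j n := by
        intro j hj
        have hj' : j ≤ n := by simpa [Nat.lt_succ_iff] using hj
        have h1 : n + 1 - j = (n - j) + 1 := by omega
        rw [h1, Finset.sum_range_succ]
        congr 2
        omega
      rw [Finset.sum_congr rfl step, Finset.sum_add_distrib,
          Finset.sum_range_succ (f := fun j => ∑ k ∈ Finset.range (n - j), g j (j + k))]
      simp

-- weighted reindexing: ∑_{r<m} ∑_{l≤r} g l = ∑_{l<m} (m-l)·g l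
theorem weight_sum (m : Nat) (g : Nat → Int) :
    ∑ r ∈ Finset.range m, ∑ l ∈ Finset.range (r + 1), g l
      = ∑ l ∈ Finset.range m, ((m - l : Nat) : Int) * g l := by
  induction m with
  | zero => simp
  | succ n ih =>
      rw [Finset.sum_range_succ, ih, Finset.sum_range_succ (f := fun l => ((n + 1 - l : Nat) : Int) * g l)]
      have step : ∀ l ∈ Finset.range n,
          ((n + 1 - l : Nat) : Int) * g l = ((n - l : Nat) : Int) * g l + g l := by
        intro l hl
        have : l < n := Finset.mem_range.mp hl
        have h1 : ((n + 1 - l : Nat) : Int) = ((n - l : Nat) : Int) + 1 := by omega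
        rw [h1]; ring
      rw [Finset.sum_congr rfl step, Finset.sum_add_distrib, Finset.sum_range_succ (f := g)]
      have : ((n + 1 - n : Nat) : Int) = 1 := by omega
      rw [this]; ring

-- ===== characterization of A's prefix array =====
theorem A_prefix (a : List Int) (m : Nat) (j : Nat) (hj : j ≤ m) :
    (PySem.List.pyRange 0 (j : Int) 1).foldl (fun pre i =>
        PySem.List.pySetD pre (i + 1) (PySem.List.pyGetD pre i 0 + PySem.List.pyGetD a i 0))
      (List.replicate (m + 1) 0)
      = (List.range (j + 1)).map (pfx a) ++ List.replicate (m - j) 0 := by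
  induction j with
  | zero =>
      simp [PySem.List.pyRange_one_eq_nil (by omega : (0:Int) ≤ 0), List.range_succ, pfx_zero,
        List.replicate_succ]
  | succ i ih =>
      have hi : i ≤ m := by omega
      have hcast : ((i + 1 : Nat) : Int) = (i : Int) + 1 := by push_cast; ring
      rw [hcast, PySem.List.pyRange_one_succ_right (by omega), List.foldl_append, ih hi]
      simp only [List.foldl_cons, List.foldl_nil]
      have hM : ((List.range (i + 1)).map (pfx a)).length = i + 1 := by simp
      have hrep : (m - i) = (m - (i + 1)) + 1 := by omega
      have hget1 : PySem.List.pyGetD ((List.range (i + 1)).map (pfx a) ++ List.replicate (m - i) 0) (i : Int) 0 = pfx a i := by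
        rw [PySem.List.pyGetD_natCast, List.getD_append _ _ _ _ (by omega), PL_getD a i i (by omega)]
      have hgeta : PySem.List.pyGetD a (i : Int) 0 = a.getD i 0 := PySem.List.pyGetD_natCast a i 0
      have hidx : ((i : Int) + 1) = ((i + 1 : Nat) : Int) := by push_cast; ring
      rw [hget1, hgeta, hidx, PySem.List.pySetD_natCast, hrep, List.replicate_succ,
          ← pfx_succ a i]
      rw [List.set_append_right _ _ (by omega)]
      have h0 : i + 1 - ((List.range (i + 1)).map (pfx a)).length = 0 := by omega
      rw [h0, List.set_cons_zero]
      rw [List.range_succ (n := i + 1), List.map_append]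
      simp

-- ===== A's double loop as a triangle sum of decomposed terms =====
theorem A_total (a : List Int) (m : Nat) (s : Int) (hs : 0 < s) :
    calculate_min_cuts (m : Int) s a
      = ∑ r ∈ Finset.range m, ∑ l ∈ Finset.range (r + 1),
          (KrV s (pfx a (r + 1)) + 1 - KlV s (pfx a l) - badV s (pfx a (r + 1)) (pfx a l)) := by
  have hrepl : (((m : Int)) + 1).toNat = m + 1 := by omega
  simp only [calculate_min_cuts, hrepl, A_prefix a m m le_rfl, Nat.sub_self,
    List.replicate_zero, List.append_nil]
  simp only [PySem.List.foldl_add]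
  rw [zero_add]
  have hub : ((m : Int) + 1) = 1 + (m : Int) := by ring
  rw [hub, sum_map_pyRange 1 m]
  have step1 : ∀ j ∈ Finset.range m,
      ((PySem.List.pyRange (1 + (j : Int)) (1 + (m : Int)) 1).map (fun r =>
          PySem.Int.floordiv
            (PySem.List.pyGetD ((List.range (m + 1)).map (pfx a)) r 0 -
              PySem.List.pyGetD ((List.range (m + 1)).map (pfx a)) (1 + (j : Int) - 1) 0 + s - 1) s)).sum
        = ∑ k ∈ Finset.range (m - j),
            (KrV s (pfx a ((j + k) + 1)) + 1 - KlV s (pfx a j) - badV s (pfx a ((j + k) + 1)) (pfx a j)) := by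
    intro j hj
    have hjm : j < m := Finset.mem_range.mp hj
    have hsplit : (1 + (m : Int)) = (1 + (j : Int)) + ((m - j : Nat) : Int) := by omega
    rw [hsplit, sum_map_pyRange (1 + (j : Int)) (m - j)]
    refine Finset.sum_congr rfl (fun k hk => ?_)
    have hkm : k < m - j := Finset.mem_range.mp hk
    have hr : (1 + (j : Int) + (k : Int)) = (((j + k + 1 : Nat)) : Int) := by push_cast; ring
    have hl : (1 + (j : Int) - 1) = ((j : Nat) : Int) := by ring
    rw [hr, hl, PySem.List.pyGetD_natCast, PySem.List.pyGetD_natCast,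
        PL_getD a m (j + k + 1) (by omega), PL_getD a m j (by omega),
        pair_id s (pfx a (j + k + 1)) (pfx a j) hs]
  rw [Finset.sum_congr rfl step1]
  exact tri_sum m (fun l r => KrV s (pfx a (r + 1)) + 1 - KlV s (pfx a l) - badV s (pfx a (r + 1)) (pfx a l))

-- ===== characterization of B's prefix list =====
theorem B_prefix (l : List Int) :
    l.foldl (fun (st : Int × List Int) x => (st.1 + x, st.2 ++ [st.1 + x])) (0, [0])
      = (l.sum, (List.range (l.length + 1)).map (fun k => (l.take k).sum)) := by
  induction l using List.reverseRecOn with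
  | nil => simp
  | append_singleton l x ih =>
      rw [List.foldl_append, ih]
      simp only [List.foldl_cons, List.foldl_nil, Prod.mk.injEq]
      refine ⟨by simp, ?_⟩
      have hlen : (l ++ [x]).length = l.length + 1 := by simp
      rw [hlen, List.range_succ (n := l.length + 1), List.map_append]
      congr 1
      · refine List.map_congr_left (fun k hk => ?_)
        have hkl : k ≤ l.length := by
          have := List.mem_range.mp hk; omega
        rw [List.take_append_of_le_length hkl]
      · have ht : (l ++ [x]).take (l.length + 1) = l ++ [x] := List.take_of_length_le (by simp)
        simp [ht]

-- ===== B's single loop: invariant =====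
theorem B_loop (a : List Int) (m : Nat) (s : Int) (j : Nat) (hj : j ≤ m) :
    (PySem.List.pyRange 1 ((j : Int) + 1) 1).foldl (fun (st : List Int × Int × Int) r =>
        (st.1 ++ [PySem.Int.mod (PySem.List.pyGetD ((List.range (m + 1)).map (pfx a)) (r - 1) 0) s],
         st.2.1 + (r * (PySem.Int.floordiv (PySem.List.pyGetD ((List.range (m + 1)).map (pfx a)) r 0 - 1) s + 1)
            - ((m : Int) - r + 1) * PySem.Int.floordiv (PySem.List.pyGetD ((List.range (m + 1)).map (pfx a)) (r - 1) 0) s),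
         st.2.2 + (st.1 ++ [PySem.Int.mod (PySem.List.pyGetD ((List.range (m + 1)).map (pfx a)) (r - 1) 0) s]).foldl
            (fun c q => if PySem.Int.mod (PySem.List.pyGetD ((List.range (m + 1)).map (pfx a)) r 0 - 1) s < q then c + 1 else c) 0))
        ([], 0, 0)
      = ((List.range j).map (fun l => PySem.Int.mod (pfx a l) s),
         ∑ r ∈ Finset.range j, (((r : Int) + 1) * (KrV s (pfx a (r + 1)) + 1) - ((m : Int) - (r : Int)) * KlV s (pfx a r)),
         ∑ r ∈ Finset.range j, ∑ l ∈ Finset.range (r + 1), badV s (pfx a (r + 1)) (pfx a l)) := by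
  induction j with
  | zero => simp
  | succ i ih =>
      have hi : i ≤ m := by omega
      have hcast : (((i + 1 : Nat) : Int) + 1) = ((i : Int) + 1) + 1 := by push_cast; ring
      rw [hcast, PySem.List.pyRange_one_succ_right (by omega), List.foldl_append, ih hi]
      simp only [List.foldl_cons, List.foldl_nil]
      have hA : ((i : Int) + 1 - 1) = ((i : Nat) : Int) := by ring
      have hB : ((i : Int) + 1) = ((i + 1 : Nat) : Int) := by push_cast; ring
      have hleft : (List.range i).map (fun l => PySem.Int.mod (pfx a l) s) ++ [PySem.Int.mod (pfx a i) s]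
          = (List.range (i + 1)).map (fun l => PySem.Int.mod (pfx a l) s) := by
        rw [List.range_succ, List.map_append]; rfl
      rw [hA, hB, PySem.List.pyGetD_natCast, PySem.List.pyGetD_natCast,
          PL_getD a m i (by omega), PL_getD a m (i + 1) (by omega), hleft]
      have hfe : (fun (c : Int) q => if PySem.Int.mod (pfx a (i + 1) - 1) s < q then c + 1 else c)
          = (fun (c : Int) q => c + (if PySem.Int.mod (pfx a (i + 1) - 1) s < q then 1 else 0)) := by
        funext c q; split <;> ring
      rw [hfe, PySem.List.foldl_add, List.map_map]
      simp only [Prod.mk.injEq, true_and]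
      refine ⟨?_, ?_⟩
      · rw [Finset.sum_range_succ]
        simp only [KrV, KlV]
        push_cast
        ring
      · rw [Finset.sum_range_succ]
        have hcomp : ((fun q => if PySem.Int.mod (pfx a (i + 1) - 1) s < q then (1:Int) else 0) ∘
            (fun l => PySem.Int.mod (pfx a l) s)) = fun l => badV s (pfx a (i + 1)) (pfx a l) := by
          funext l; rfl
        rw [hcomp, sum_map_listrange, zero_add]

-- ===== B's value in closed form =====
theorem B_total (a : List Int) (m : Nat) (s : Int) (hlen : m ≤ a.length) :
    calculate_min_cuts_alt (m : Int) s a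
      = (∑ r ∈ Finset.range m, (((r : Int) + 1) * (KrV s (pfx a (r + 1)) + 1) - ((m : Int) - (r : Int)) * KlV s (pfx a r)))
        - ∑ r ∈ Finset.range m, ∑ l ∈ Finset.range (r + 1), badV s (pfx a (r + 1)) (pfx a l) := by
  have hsl : PySem.List.slice a none (some ((m : Nat) : Int)) = a.take m :=
    PySem.List.slice_to_natCast a m
  have hlt : (a.take m).length = m := by simp [hlen]
  have hP : (List.range ((a.take m).length + 1)).map (fun k => ((a.take m).take k).sum)
      = (List.range (m + 1)).map (pfx a) := by
    rw [hlt]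
    refine List.map_congr_left (fun k hk => ?_)
    have hkm : k ≤ m := by have := List.mem_range.mp hk; omega
    unfold pfx
    rw [List.take_take, min_eq_left hkm]
  simp only [calculate_min_cuts_alt, hsl, B_prefix, hP]
  rw [B_loop a m s m le_rfl]

-- ===== both sides meet =====
theorem main_eq (n s : Int) (a : List Int) (hpre : Pre_calculate_min_cuts n s a) :
    calculate_min_cuts n s a = calculate_min_cuts_alt n s a := by
  by_cases hn : n ≤ 0
  · have hA : PySem.List.pyRange 1 (n + 1) 1 = [] := PySem.List.pyRange_one_eq_nil (by omega)
    simp [calculate_min_cuts, calculate_min_cuts_alt, hA]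
  · have hn' : 0 < n := by omega
    obtain ⟨hlen, hs0⟩ := hpre
    have hs : 0 < s := hs0 hn'
    have hm : n = ((n.toNat : Nat) : Int) := by omega
    set m := n.toNat with hmdef
    have hml : m ≤ a.length := by omega
    rw [hm, A_total a m s hs, B_total a m s hml]
    have expand : ∀ r ∈ Finset.range m,
        ∑ l ∈ Finset.range (r + 1),
            (KrV s (pfx a (r + 1)) + 1 - KlV s (pfx a l) - badV s (pfx a (r + 1)) (pfx a l))
          = ((r : Int) + 1) * (KrV s (pfx a (r + 1)) + 1)
            - (∑ l ∈ Finset.range (r + 1), KlV s (pfx a l))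
            - ∑ l ∈ Finset.range (r + 1), badV s (pfx a (r + 1)) (pfx a l) := by
      intro r hr
      rw [Finset.sum_sub_distrib, Finset.sum_sub_distrib, Finset.sum_const, Finset.card_range,
          nsmul_eq_mul]
      push_cast
      ring
    rw [Finset.sum_congr rfl expand, Finset.sum_sub_distrib, Finset.sum_sub_distrib,
        weight_sum m (fun l => KlV s (pfx a l))]
    have hcast : ∀ l ∈ Finset.range m,
        ((m - l : Nat) : Int) * KlV s (pfx a l) = ((m : Int) - (l : Int)) * KlV s (pfx a l) := by
      intro l hl
      have : l < m := Finset.mem_range.mp hl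
      have h1 : ((m - l : Nat) : Int) = (m : Int) - (l : Int) := by omega
      rw [h1]
    rw [Finset.sum_congr rfl hcast, Finset.sum_sub_distrib]

-- ===== VERDICT (by name: the statement is the Claim_ definition above) =====
theorem calculate_min_cuts_spec : Claim_equal_calculate_min_cuts := by
  intro n s a _hdom hpre
  unfold Spec_calculate_min_cuts
  exact main_eq n s a hpre
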